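-- pv_equiv track=rewrite | github.com/Ninosha/Internship | algorithms/2.py | final_words_list
-- ===== SOURCE A (Python) =====
-- def word_func(word):
--     for i in range(len(word)):
--         word = word[::-1]
--         k = i
--         for j in range(len(word) + 1):
--             k += 1
--             if k < len(word):
--                 if word[i] > word[k]:
--                     word = list(word)
--                     temp = word[i]
--                     word[i] = word[k]
--                     word[k] = temp
--                 return "".join(word[::-1])
--
-- def final_words_list(words_list):
--     listo = []
--     for word in words_list:
--         if word_func(word) == word:
--             listo.append("no result")
--         else:
--             listo.append(word_func(word))
--
--     return listo
-- ===== SOURCE B (Python) =====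
-- def _shift(w):
--     # word_func returns None for words shorter than 2 characters
--     if len(w) < 2:
--         return None
--     if w[-1] > w[-2]:
--         return w[:-2] + w[-1] + w[-2]
--     return "no result"
--
--
-- def final_words_list(words_list):
--     return [_shift(w) for w in words_list]
-- ===== Notes on version B (the rewrite author's own statement) =====
-- stated objective: simpler
-- what changed: Replaced the obfuscated double-reverse nested-loop helper (which only ever swaps the last two characters) by a direct per-word computation: None for words shorter than 2, last two characters swapped if the last is greater, else 'no result'.
import Mathlib
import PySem

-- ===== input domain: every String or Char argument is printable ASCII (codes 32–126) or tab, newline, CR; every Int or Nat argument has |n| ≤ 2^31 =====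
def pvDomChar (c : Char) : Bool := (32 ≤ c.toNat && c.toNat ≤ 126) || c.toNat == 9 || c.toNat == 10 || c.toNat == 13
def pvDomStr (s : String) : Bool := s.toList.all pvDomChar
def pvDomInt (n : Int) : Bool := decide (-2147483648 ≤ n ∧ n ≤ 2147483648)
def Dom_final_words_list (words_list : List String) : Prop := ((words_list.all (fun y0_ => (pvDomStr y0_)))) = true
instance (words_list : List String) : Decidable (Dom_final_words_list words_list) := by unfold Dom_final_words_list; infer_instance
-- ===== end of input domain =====

-- B replaces A's obfuscated double-reverse nested-loop helper (which only ever swaps the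
-- last two characters of a word) by a direct per-word computation; objective: simpler.


-- ===== PORT A =====
-- inner loop of word_func: 'for j in range(len(word)+1): k += 1; if k < len(word): …; return …'
-- fuel = remaining iterations of the j-loop; 'some res' = the Python 'return', 'none' = loop ended.
def wfInner (word : List Char) (i : Nat) : Int → Nat → Option (List Char)
  | _, 0 => none
  | k, j + 1 =>
    let k := k + 1
    if k < (word.length : Int) then
      -- word[i] and word[k] are read before the swap writes, exactly as the Python temp-swap does
      let wi := word.getD i ' '
      let wk := word.getD k.toNat ' '
      let word := if wi > wk then (word.set i wk).set k.toNat wi else word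
      some word.reverse           -- return "".join(word[::-1])
    else wfInner word i k j

-- outer loop of word_func: 'for i in range(len(word))'; the reversal 'word = word[::-1]' persists
-- into the next iteration when the inner loop does not return; fuel = remaining values of i.
def wfOuter : List Char → Nat → Nat → Option (List Char)
  | _, _, 0 => none
  | word, i, n + 1 =>
    let word := word.reverse
    match wfInner word i (i : Int) (word.length + 1) with
    | some res => some res
    | none => wfOuter word (i + 1) n

def word_func (w : String) : Option String :=
  (wfOuter w.toList 0 w.toList.length).map String.ofList   -- implicit 'return None' when the loops end

def final_words_list (words_list : List String) : List (Option String) :=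
  words_list.foldl
    (fun listo word =>
      if word_func word = some word then listo ++ [some "no result"]
      else listo ++ [word_func word])
    []

-- ===== PORT B =====
def shiftB (w : String) : Option String :=
  if PySem.Str.len w < 2 then none
  else
    match PySem.Str.pyGet? w (-1), PySem.Str.pyGet? w (-2) with
    | some a, some b =>
      if a > b then some (String.ofList (PySem.Chars.slice w.toList none (some (-2)) ++ [a, b]))
      else some "no result"
    | _, _ => none   -- unreachable: len ≥ 2, so w[-1] and w[-2] exist

def final_words_list_alt (words_list : List String) : List (Option String) :=
  words_list.map shiftB

-- ===== PRECONDITION & SPEC =====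
def Spec_final_words_list (words_list : List String) (out : List (Option String)) : Prop := out = final_words_list_alt words_list
instance (words_list : List String) (out : List (Option String)) : Decidable (Spec_final_words_list words_list out) := by unfold Spec_final_words_list; infer_instance

-- ===== CLAIM (what is proved, stated in full; the proofs are below) =====
def Claim_equal_final_words_list : Prop := ∀ (words_list : List String), Dom_final_words_list words_list → Spec_final_words_list words_list (final_words_list words_list)

-- ===== LEMMAS AND PROOFS =====

-- A's per-word value, as the fold step appends it
def stepA (w : String) : Option String :=
  if word_func w = some w then some "no result" else word_func w

lemma foldA_eq_map (ws : List String) (acc : List (Option String)) :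
    ws.foldl
      (fun listo word =>
        if word_func word = some word then listo ++ [some "no result"]
        else listo ++ [word_func word]) acc = acc ++ ws.map stepA := by
  induction ws generalizing acc with
  | nil => simp
  | cons w ws ih =>
    simp only [List.foldl_cons, List.map_cons, ih, stepA]
    split <;> simp

lemma word_func_rev_cons (w : String) (a b : Char) (t : List Char)
    (h : w.toList.reverse = a :: b :: t) :
    word_func w =
      some (String.ofList ((if a > b then b :: a :: t else a :: b :: t).reverse)) := by
  have hlen : w.toList.length = t.length + 2 := by
    have := congrArg List.length h
    simpa using this
  unfold word_func
  rw [hlen]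
  simp only [wfOuter, h]
  simp only [wfInner]
  norm_num

lemma perWord (w : String) : stepA w = shiftB w := by
  rcases h : w.toList.reverse with _ | ⟨a, rest⟩
  · -- w = ""
    have h0 : w.toList = [] := by simpa using congrArg List.reverse h
    have hw : word_func w = none := by
      unfold word_func; rw [h0]; rfl
    simp [stepA, shiftB, hw, PySem.Str.len, h0]
  · rcases rest with _ | ⟨b, t⟩
    · -- single character
      have h1 : w.toList = [a] := by simpa using congrArg List.reverse h
      have hw : word_func w = none := by
        unfold word_func; rw [h1]
        simp [wfOuter, wfInner]
      simp [stepA, shiftB, hw, PySem.Str.len, h1]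
    · -- at least two characters; w.toList = t.reverse ++ [b, a]
      have hcs : w.toList = t.reverse ++ [b, a] := by
        have := congrArg List.reverse h
        simpa using this
      have hlen : w.toList.length = t.length + 2 := by simp [hcs]
      have hwf := word_func_rev_cons w a b t h
      have hget1 : PySem.Str.pyGet? w (-1) = some a := by
        simp [PySem.List.pyGet?_neg_one, hcs]
      have hget2 : PySem.Str.pyGet? w (-2) = some b := by
        rw [PySem.Str.pyGet?_eq, PySem.Chars.pyGet?_eq_listPyGet?,
          PySem.List.pyGet?_neg_ofNat _ 2 (by omega) (by omega), hlen]
        simp [hcs]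
      have hslice : PySem.List.slice w.toList none (some (-2)) = t.reverse := by
        rw [PySem.List.slice_to_neg_ofNat _ 2 (by omega), hlen]
        simp [hcs]
      have hmk : String.ofList w.toList = w := by simp
      have hlt : ¬ PySem.Str.len w < 2 := by
        simp [pysem, hlen]
        omega
      by_cases hab : a > b
      · have hne : word_func w ≠ some w := by
          rw [hwf, if_pos hab]
          intro hcontra
          have h2 := congrArg String.toList (Option.some.inj hcontra)
          rw [hcs] at h2
          simp at h2
          exact absurd h2.1 (ne_of_gt hab)
        simp only [stepA]
        rw [if_neg hne, hwf, if_pos hab]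
        unfold shiftB
        rw [if_neg hlt, hget1, hget2]
        simp [hslice, hab]
      · have heq : word_func w = some w := by
          rw [hwf, if_neg hab]
          rw [← hmk, hcs]
          simp
        simp only [stepA]
        rw [if_pos heq]
        unfold shiftB
        rw [if_neg hlt, hget1, hget2]
        simp [hab]

-- ===== VERDICT (by name: the statement is the Claim_ definition above) =====
theorem final_words_list_spec : Claim_equal_final_words_list := by
  intro ws _
  unfold Spec_final_words_list final_words_list final_words_list_alt
  rw [foldA_eq_map]
  simp [perWord]
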